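-- pv_equiv track=rewrite | github.com/Giorgi56/TP4 | version_finale.py | creation_zebrev
-- ===== SOURCE A (Python) =====
-- def creation_zebrev(n:int):
--     """Lignes verticales"""
--     renvoyer = []
--     for i in range(n):
--         l = []
--         for j in range(n):
--             l.append(not(j % 2))
--         renvoyer.append(l)
--     return renvoyer
-- ===== SOURCE B (Python) =====
-- def creation_zebrev(n:int):
--     """Lignes verticales"""
--     pat = [True, False]
--     while len(pat) < n:
--         pat += pat
--     return [pat[:n] for _ in range(n)]
-- ===== Notes on version B (the rewrite author's own statement) =====
-- stated objective: alternative
-- what changed: B builds the alternating pattern by exponential doubling of [True, False] (no per-cell parity computation), then slices fresh n-prefix copies per row, replacing A's nested loop that evaluates the parity for every cell.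
import Mathlib
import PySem

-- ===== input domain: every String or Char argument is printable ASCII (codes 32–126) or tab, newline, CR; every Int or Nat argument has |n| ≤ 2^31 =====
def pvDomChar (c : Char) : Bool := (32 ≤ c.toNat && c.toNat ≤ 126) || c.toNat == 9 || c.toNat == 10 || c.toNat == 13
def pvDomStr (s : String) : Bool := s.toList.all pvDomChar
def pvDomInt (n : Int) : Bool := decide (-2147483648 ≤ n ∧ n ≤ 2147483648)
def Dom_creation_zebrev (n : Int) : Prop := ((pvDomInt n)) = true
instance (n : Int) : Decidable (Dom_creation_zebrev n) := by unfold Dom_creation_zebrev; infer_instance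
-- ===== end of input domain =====

-- B builds the alternating pattern by exponential doubling and slices per-row copies, instead of per-cell parity; return values proved equal.

-- ===== PORT A =====
def creation_zebrev (n : Int) : List (List Bool) :=
  (PySem.List.pyRange 0 n 1).foldl
    (fun renvoyer _i =>
      renvoyer ++ [(PySem.List.pyRange 0 n 1).foldl
        (fun l j => l ++ [decide (PySem.Int.mod j 2 = 0)]) []])
    []

-- ===== PORT B =====
-- the `while len(pat) < n: pat += pat` loop; fuel n.toNat is a totality guard only
-- (doubling reaches length >= n well before the fuel runs out; proved in pvDouble_spec below)
def pvDouble : Nat → Nat → List Bool → List Bool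
  | 0, _, pat => pat
  | fuel + 1, n, pat => if pat.length < n then pvDouble fuel n (pat ++ pat) else pat

-- pat[:n] inside the comprehension: n > 0 whenever range(n) is nonempty, so List.take n.toNat is exact
def creation_zebrev_alt (n : Int) : List (List Bool) :=
  let pat := pvDouble n.toNat n.toNat [true, false]
  (PySem.List.pyRange 0 n 1).map (fun _ => pat.take n.toNat)

-- ===== PRECONDITION & SPEC =====
def Spec_creation_zebrev (n : Int) (out : List (List Bool)) : Prop := out = creation_zebrev_alt n
instance (n : Int) (out : List (List Bool)) : Decidable (Spec_creation_zebrev n out) := by unfold Spec_creation_zebrev; infer_instance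

-- ===== CLAIM (what is proved, stated in full; the proofs are below) =====
def Claim_equal_creation_zebrev : Prop := ∀ (n : Int), Dom_creation_zebrev n → Spec_creation_zebrev n (creation_zebrev n)

-- ===== LEMMAS AND PROOFS =====
theorem pv_foldl_push {α β : Type} (f : α → β) (l : List α) (acc : List β) :
    l.foldl (fun a x => a ++ [f x]) acc = acc ++ l.map f := by
  induction l generalizing acc with
  | nil => simp
  | cons x xs ih => simp [List.foldl, ih]

-- concatenations of [true, false] are exactly the alternating even/odd pattern
theorem pv_flat_replicate (m : Nat) :
    List.flatten (List.replicate m [true, false])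
      = (List.range (2 * m)).map (fun k => decide (k % 2 = 0)) := by
  induction m with
  | zero => rfl
  | succ m ih =>
    have h2 : 2 * (m + 1) = 2 + 2 * m := by ring
    rw [List.replicate_succ, List.flatten_cons, ih, h2, List.range_add, List.map_append]
    simp [List.range_succ, Function.comp_def, Nat.add_mod_left]

theorem pv_flat_add (a b : Nat) :
    List.flatten (List.replicate a [true, false]) ++ List.flatten (List.replicate b [true, false])
      = List.flatten (List.replicate (a + b) [true, false]) := by
  rw [List.replicate_add, List.flatten_append]

-- the doubling loop returns a concatenation of copies of [true, false] of length at least n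
theorem pvDouble_spec (fuel n m : Nat) (h : n ≤ 2 ^ fuel * (2 * m)) :
    ∃ m', pvDouble fuel n (List.flatten (List.replicate m [true, false]))
        = List.flatten (List.replicate m' [true, false]) ∧ n ≤ 2 * m' := by
  induction fuel generalizing m with
  | zero => exact ⟨m, rfl, by simpa using h⟩
  | succ fuel ih =>
    rw [pvDouble]
    split_ifs with hlen
    · rw [pv_flat_add]
      have : n ≤ 2 ^ fuel * (2 * (m + m)) := by
        calc n ≤ 2 ^ (fuel + 1) * (2 * m) := h
        _ = 2 ^ fuel * (2 * (m + m)) := by ring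
      exact ih (m + m) this
    · refine ⟨m, rfl, ?_⟩
      simpa [pv_flat_replicate] using hlen

-- ===== VERDICT (by name: the statement is the Claim_ definition above) =====
theorem creation_zebrev_spec : Claim_equal_creation_zebrev := by
  intro n _
  unfold Spec_creation_zebrev creation_zebrev creation_zebrev_alt
  simp only [pv_foldl_push, List.nil_append]
  -- the fuel suffices: n.toNat ≤ 2 ^ n.toNat * 2
  have hfuel : n.toNat ≤ 2 ^ n.toNat * (2 * 1) := by
    have := Nat.lt_two_pow_self (n := n.toNat)
    omega
  obtain ⟨m', hd, hm'⟩ := pvDouble_spec n.toNat n.toNat 1 hfuel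
  have hpat : pvDouble n.toNat n.toNat [true, false]
      = (List.range (2 * m')).map (fun k => decide (k % 2 = 0)) := by
    simpa [pv_flat_replicate] using hd
  rw [hpat, ← List.map_take, List.take_range, Nat.min_eq_left hm']
  -- both rows are the same alternating prefix
  have hrow : (PySem.List.pyRange 0 n 1).map (fun j => decide (PySem.Int.mod j 2 = 0))
      = (List.range n.toNat).map (fun k => decide (k % 2 = 0)) := by
    rw [PySem.List.pyRange_one, List.map_map]
    simp only [Int.sub_zero]
    refine List.map_congr_left (fun k _ => ?_)
    simp only [Function.comp_apply, decide_eq_decide]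
    rw [PySem.Int.mod_eq_zero_iff_dvd]
    omega
  rw [hrow]
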